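-- pv_equiv track=rewrite | github.com/qiaobaojoe/leetCode_daily | july/simple.py | is_incremovable
-- ===== SOURCE A (Python) =====
-- from typing import List
--
-- def is_incremovable(nums: List[int], i: int, subarray_size: int) -> bool:
--     if i == 0:
--         cur = nums[subarray_size]
--         for j in range(subarray_size + 1, len(nums)):
--             if nums[j] > cur:
--                 cur = nums[j]
--             else:
--                 return False
--
--         return True
--
--     cur = nums[0]
--     for j in range(1, i):
--         if nums[j] > cur:
--             cur = nums[j]
--         else:
--             return False
--
--     for j in range(subarray_size + i, len(nums)):
--         if nums[j] > cur:
--             cur = nums[j]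
--         else:
--             return False
--
--     return True
-- ===== SOURCE B (Python) =====
-- from typing import List
--
-- def is_incremovable(nums: List[int], i: int, subarray_size: int) -> bool:
--     rest = nums[:i] + nums[i + subarray_size:]
--     return rest == sorted(set(rest))
-- ===== Notes on version B (the rewrite author's own statement) =====
-- stated objective: alternative
-- what changed: B decides strict increase of the surviving list by comparing it with the sorted list of its distinct elements (rest == sorted(set(rest))), an order/duplicate characterisation via sort+dedup, instead of A's two index-driven scans carrying a running maximum.
-- outside the precondition, e.g. on is_incremovable([1, 0, 2], 0, -1): A returns False, B returns True; on is_incremovable([1, 2], -1, 5): A returns True, B returns True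
import Mathlib
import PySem

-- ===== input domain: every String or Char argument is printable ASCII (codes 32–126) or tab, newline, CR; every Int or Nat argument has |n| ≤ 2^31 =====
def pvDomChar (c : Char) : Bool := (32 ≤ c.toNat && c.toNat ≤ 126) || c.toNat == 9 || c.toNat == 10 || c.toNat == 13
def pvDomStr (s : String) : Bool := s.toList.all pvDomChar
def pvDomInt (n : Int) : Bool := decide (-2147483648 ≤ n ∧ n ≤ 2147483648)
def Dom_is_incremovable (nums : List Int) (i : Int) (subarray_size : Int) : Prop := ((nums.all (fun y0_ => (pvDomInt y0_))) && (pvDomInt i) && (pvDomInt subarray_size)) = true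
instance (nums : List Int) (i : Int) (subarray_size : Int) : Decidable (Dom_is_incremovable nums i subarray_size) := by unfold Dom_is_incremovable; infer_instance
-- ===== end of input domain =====

-- B decides strict increase of the surviving list by comparing it with the sorted list of its
-- distinct elements (rest == sorted(set(rest))), replacing A's running-max scans; equal to A on Pre_.

-- ===== PORT A =====
-- A's two 'for j in range(…): if nums[j] > cur: cur = nums[j] else: return False' loops:
-- returns 'some cur' on normal completion, 'none' for the early 'return False'
-- (and also when nums[j] would raise IndexError — outside Pre_, nothing is claimed there).
def pvGoA (nums : List Int) (j b : Int) (cur : Int) : Option Int :=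
  if _h : j < b then
    match PySem.List.pyGet? nums j with
    | none => none
    | some v => if cur < v then pvGoA nums (j + 1) b v else none
  else some cur
termination_by (b - j).toNat
decreasing_by omega

def is_incremovable (nums : List Int) (i : Int) (subarray_size : Int) : Bool :=
  if i = 0 then
    match PySem.List.pyGet? nums subarray_size with
    | none => false
    | some cur =>
      (pvGoA nums (subarray_size + 1) (nums.length : Int) cur).isSome
  else
    match PySem.List.pyGet? nums 0 with
    | none => false
    | some cur =>
      match pvGoA nums 1 i cur with
      | none => false
      | some cur2 =>
        (pvGoA nums (subarray_size + i) (nums.length : Int) cur2).isSome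

-- ===== PORT B =====
-- rest = nums[:i] + nums[i+subarray_size:]; return rest == sorted(set(rest))
def is_incremovable_alt (nums : List Int) (i : Int) (subarray_size : Int) : Bool :=
  let rest := PySem.List.slice nums none (some i) ++ PySem.List.slice nums (some (i + subarray_size)) none
  decide (rest = PySem.List.sorted (PySem.Set.ofList rest) (fun x => x))

-- ===== PRECONDITION & SPEC =====
-- Pre_ excludes (a) negative i or negative subarray_size, outside the natural domain (an index
-- and a size), where A's values come from Python's accidental negative-index wraparound, and
-- (b) exactly the inputs where A raises IndexError: i = 0 with subarray_size ≥ len(nums), empty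
-- nums with i ≠ 0, and i > len(nums) with nums strictly increasing (the prefix scan runs off the end).
def Pre_is_incremovable (nums : List Int) (i : Int) (subarray_size : Int) : Prop :=
  0 ≤ i ∧ 0 ≤ subarray_size ∧
    ((i = 0 ∧ subarray_size < (nums.length : Int)) ∨
     (1 ≤ i ∧ nums ≠ [] ∧ (i ≤ (nums.length : Int) ∨ ¬ List.IsChain (· < ·) nums)))
instance (nums : List Int) (i : Int) (subarray_size : Int) : Decidable (Pre_is_incremovable nums i subarray_size) := by unfold Pre_is_incremovable; infer_instance

def pvWitness_is_incremovable : List Int × Int × Int := ([1, 3, 2, 4], 1, 1)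

def Spec_is_incremovable (nums : List Int) (i : Int) (subarray_size : Int) (out : Bool) : Prop := out = is_incremovable_alt nums i subarray_size
instance (nums : List Int) (i : Int) (subarray_size : Int) (out : Bool) : Decidable (Spec_is_incremovable nums i subarray_size out) := by unfold Spec_is_incremovable; infer_instance

-- ===== CLAIM (what is proved, stated in full; the proofs are below) =====
def Claim_equal_is_incremovable : Prop := ∀ (nums : List Int) (i : Int) (subarray_size : Int), Dom_is_incremovable nums i subarray_size → Pre_is_incremovable nums i subarray_size → Spec_is_incremovable nums i subarray_size (is_incremovable nums i subarray_size)

-- ===== LEMMAS AND PROOFS =====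

-- proof-side name for 'strictly increasing', the common meeting point of the two ports
def pvStrict (l : List Int) : Bool := decide (List.IsChain (· < ·) l)

-- B's sort/dedup test decides exactly strict increase
theorem pvSortedDedup_iff (l : List Int) :
    (l = PySem.List.sorted (PySem.Set.ofList l) (fun x => x)) ↔ List.IsChain (· < ·) l := by
  rw [List.isChain_iff_pairwise]
  constructor
  · intro h
    rw [h]
    exact PySem.List.sorted_ofList_pairwise_lt l
  · intro h
    have hnd : l.Nodup := h.imp ne_of_lt
    rw [PySem.Set.ofList_eq_self_of_nodup l hnd]
    exact (PySem.List.sorted_eq_of_perm_of_pairwise_lt l l _ (List.Perm.refl l) h).symm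

theorem alt_eq_strict (nums : List Int) (i subarray_size : Int) :
    is_incremovable_alt nums i subarray_size
      = pvStrict (PySem.List.slice nums none (some i)
          ++ PySem.List.slice nums (some (i + subarray_size)) none) := by
  simp only [is_incremovable_alt, pvStrict, decide_eq_decide]
  exact pvSortedDedup_iff _

-- abstract chain checker: walks the list carrying the running maximum (A's loop shape)
def pvChain (cur : Int) (l : List Int) : Option Int :=
  match l with
  | [] => some cur
  | x :: r => if cur < x then pvChain x r else none

theorem pvChain_append (p s : List Int) : ∀ cur,
    pvChain cur (p ++ s) = match pvChain cur p with | none => none | some c => pvChain c s := by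
  induction p with
  | nil => intro cur; simp [pvChain]
  | cons x r ih =>
    intro cur
    simp only [List.cons_append, pvChain]
    by_cases h : cur < x
    · simp [h, ih]
    · simp [h]

theorem pvChain_isSome_iff (r : List Int) : ∀ x,
    (pvChain x r).isSome = true ↔ List.IsChain (· < ·) (x :: r) := by
  induction r with
  | nil => intro x; simp [pvChain]
  | cons y r ih =>
    intro x
    by_cases h : x < y
    · simp only [pvChain, if_pos h, List.isChain_cons_cons]
      rw [ih y]
      simp [h]
    · simp [pvChain, h, List.isChain_cons_cons]

theorem pvStrict_cons (x : Int) (r : List Int) :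
    pvStrict (x :: r) = (pvChain x r).isSome := by
  rcases hb : (pvChain x r).isSome with _ | _
  · simp only [pvStrict, decide_eq_false_iff_not]
    intro hc
    rw [(pvChain_isSome_iff r x).mpr hc] at hb
    simp at hb
  · simp [pvStrict, (pvChain_isSome_iff r x).mp hb]

theorem pvGoA_range (nums : List Int) : ∀ (n : Nat) (a b cur : Int), (b - a).toNat = n →
    0 ≤ a → b ≤ (nums.length : Int) →
    pvGoA nums a b cur = pvChain cur ((nums.take b.toNat).drop a.toNat) := by
  intro n
  induction n with
  | zero =>
    intro a b cur hn ha hb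
    have hba : ¬ a < b := by omega
    rw [pvGoA, dif_neg hba]
    have hlen : (nums.take b.toNat).length ≤ a.toNat := by
      simp only [List.length_take]; omega
    rw [List.drop_eq_nil_of_le hlen]
    simp [pvChain]
  | succ n ih =>
    intro a b cur hn ha hb
    have hab : a < b := by omega
    have haN : a.toNat < nums.length := by omega
    have hget : PySem.List.pyGet? nums a = some nums[a.toNat] :=
      PySem.List.pyGet?_eq_some_getElem _ ha (by omega : a < (nums.length : Int))
    have htlen : a.toNat < (nums.take b.toNat).length := by
      simp only [List.length_take]; omega
    have hdrop : (nums.take b.toNat).drop a.toNat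
        = (nums.take b.toNat)[a.toNat] :: (nums.take b.toNat).drop (a.toNat + 1) :=
      List.drop_eq_getElem_cons htlen
    have hel : (nums.take b.toNat)[a.toNat] = nums[a.toNat] := List.getElem_take
    rw [pvGoA, dif_pos hab, hdrop, hel]
    simp only [hget, pvChain]
    by_cases hc : cur < nums[a.toNat]
    · simp only [if_pos hc]
      have := ih (a + 1) b nums[a.toNat] (by omega) (by omega) hb
      rw [this]
      have : (a + 1).toNat = a.toNat + 1 := by omega
      rw [this]
    · simp [if_neg hc]

theorem pvGoA_none (nums : List Int) : ∀ (n : Nat) (a b cur : Int),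
    ((nums.length : Int) - a).toNat = n → 0 ≤ a → a ≤ (nums.length : Int) →
    (nums.length : Int) < b → pvGoA nums a b cur = none := by
  intro n
  induction n with
  | zero =>
    intro a b cur hn ha hale hb
    have hae : a = (nums.length : Int) := by omega
    rw [pvGoA, dif_pos (by omega : a < b), hae]
    rw [PySem.List.pyGet?_natCast]
    simp
  | succ n ih =>
    intro a b cur hn ha hale hb
    have halt : a < (nums.length : Int) := by omega
    have hget : PySem.List.pyGet? nums a = some nums[a.toNat] :=
      PySem.List.pyGet?_eq_some_getElem _ ha halt
    rw [pvGoA, dif_pos (by omega : a < b)]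
    simp only [hget]
    by_cases hc : cur < nums[a.toNat]
    · simp only [if_pos hc]
      exact ih (a + 1) b nums[a.toNat] (by omega) (by omega) (by omega) hb
    · simp [if_neg hc]

theorem is_incremovable_eq (nums : List Int) (i subarray_size : Int)
    (hpre : Pre_is_incremovable nums i subarray_size) :
    is_incremovable nums i subarray_size = is_incremovable_alt nums i subarray_size := by
  obtain ⟨hi, hss, hcase⟩ := hpre
  rw [alt_eq_strict]
  by_cases hi0 : i = 0
  · -- i = 0 branch
    subst hi0
    have hlt : subarray_size < (nums.length : Int) := by
      rcases hcase with ⟨_, h⟩ | ⟨h, _, _⟩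
      · exact h
      · omega
    have hltN : subarray_size.toNat < nums.length := by omega
    have hget : PySem.List.pyGet? nums subarray_size = some nums[subarray_size.toNat] :=
      PySem.List.pyGet?_eq_some_getElem _ hss hlt
    have hrange := pvGoA_range nums ((nums.length : Int) - (subarray_size + 1)).toNat
      (subarray_size + 1) (nums.length : Int) nums[subarray_size.toNat] rfl (by omega) le_rfl
    have hdropn : nums.drop subarray_size.toNat
        = nums[subarray_size.toNat] :: nums.drop (subarray_size.toNat + 1) :=
      List.drop_eq_getElem_cons hltN
    have hrest : PySem.List.slice nums none (some (0:Int))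
          ++ PySem.List.slice nums (some ((0:Int) + subarray_size)) none
        = nums.drop subarray_size.toNat := by
      simp [PySem.List.slice_to nums (le_refl (0:Int)),
        PySem.List.slice_from nums hss]
    have hT : ((nums.length : Int)).toNat = nums.length := by omega
    have hT2 : (subarray_size + 1).toNat = subarray_size.toNat + 1 := by omega
    rw [hT, hT2, List.take_length] at hrange
    rw [hrest, hdropn, pvStrict_cons]
    simp [is_incremovable, hget, hrange]
  · -- i ≥ 1 branch
    have h1 : 1 ≤ i := by omega
    have hne : nums ≠ [] := by
      rcases hcase with ⟨h, _⟩ | ⟨_, h, _⟩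
      · omega
      · exact h
    have hlen1 : 1 ≤ nums.length := by
      cases nums with
      | nil => exact absurd rfl hne
      | cons x t => simp
    have hget0 : PySem.List.pyGet? nums 0 = some nums[(0:Int).toNat] :=
      PySem.List.pyGet?_eq_some_getElem _ le_rfl (by exact_mod_cast (by omega : (0:Int) < (nums.length : Int)))
    by_cases hile : i ≤ (nums.length : Int)
    · -- prefix index range stays inside the list
      have hpre' := pvGoA_range nums (i - 1).toNat 1 i nums[(0:Int).toNat] rfl (by omega) hile
      have hsuf : ∀ c, pvGoA nums (subarray_size + i) (nums.length : Int) c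
          = pvChain c (nums.drop (i + subarray_size).toNat) := by
        intro c
        have := pvGoA_range nums ((nums.length : Int) - (subarray_size + i)).toNat
          (subarray_size + i) (nums.length : Int) c rfl (by omega) le_rfl
        rw [this]
        have hT : ((nums.length : Int)).toNat = nums.length := by omega
        have hT2 : (subarray_size + i).toNat = (i + subarray_size).toNat := by omega
        rw [hT, hT2, List.take_length]
      have hiN : 1 ≤ i.toNat := by omega
      have htake : nums.take i.toNat
          = nums[(0:Int).toNat] :: (nums.take i.toNat).drop 1 := by
        have h0 : 0 < (nums.take i.toNat).length := by
          simp only [List.length_take]; omega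
        have := List.drop_eq_getElem_cons h0
        simpa [List.getElem_take] using this
      have hrest : PySem.List.slice nums none (some i)
            ++ PySem.List.slice nums (some (i + subarray_size)) none
          = nums.take i.toNat ++ nums.drop (i + subarray_size).toNat := by
        simp [PySem.List.slice_to nums hi,
          PySem.List.slice_from nums (by omega : (0:Int) ≤ i + subarray_size)]
      rw [show ((1:Int).toNat) = 1 from rfl] at hpre'
      rw [hrest, htake, List.cons_append, pvStrict_cons, pvChain_append]
      simp only [is_incremovable, if_neg hi0, hget0, hpre']
      cases hc : pvChain nums[(0:Int).toNat] ((nums.take i.toNat).drop 1) with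
      | none => simp
      | some c => simp [hsuf c]
    · -- i > len(nums): A's prefix scan reaches j = len; Pre_ says nums is not strictly
      -- increasing, so the scan returned False before raising; B's rest is nums itself.
      have hchain : ¬ List.IsChain (· < ·) nums := by
        rcases hcase with ⟨h0, _⟩ | ⟨_, _, h | h⟩
        · omega
        · exact absurd h hile
        · exact h
      have hlen_lt : (nums.length : Int) < i := by omega
      have hA : ∀ c, pvGoA nums 1 i c = none := fun c =>
        pvGoA_none nums ((nums.length : Int) - 1).toNat 1 i c rfl (by omega) (by omega) hlen_lt
      have htake : nums.take i.toNat = nums := List.take_of_length_le (by omega)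
      have hdrop : nums.drop (i + subarray_size).toNat = [] :=
        List.drop_eq_nil_of_le (by omega)
      have hrest : PySem.List.slice nums none (some i)
            ++ PySem.List.slice nums (some (i + subarray_size)) none = nums := by
        simp [PySem.List.slice_to nums hi,
          PySem.List.slice_from nums (by omega : (0:Int) ≤ i + subarray_size), htake, hdrop]
      rw [hrest]
      have hBfalse : pvStrict nums = false := by
        simpa [pvStrict] using hchain
      rw [hBfalse]
      simp [is_incremovable, if_neg hi0, hget0, hA]

-- ===== VERDICT (by name: the statement is the Claim_ definition above) =====
theorem is_incremovable_spec : Claim_equal_is_incremovable := by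
  intro nums i subarray_size _ hpre
  unfold Spec_is_incremovable
  exact is_incremovable_eq nums i subarray_size hpre
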